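-- pv_equiv track=rewrite | github.com/a-kazakov/rockjudge | src/server/scoring_systems/vftsarr/implementation/tour_contexts.py | make_places
-- ===== SOURCE A (Python) =====
-- from typing import List, Optional, Any, Dict
--
-- def make_places(totals: List[Any]) -> List[int]:
--     result: List[int] = [0] * len(totals)
--     latest_place = 0
--     for idx, total_score in enumerate(totals):
--         if idx == 0 or total_score != totals[idx - 1]:
--             latest_place = idx + 1
--         result[idx] = latest_place
--     return result
-- ===== SOURCE B (Python) =====
-- from itertools import groupby
--
-- def make_places(totals):
--     result = []
--     i = 0
--     for _, group in groupby(totals):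
--         n = len(list(group))
--         result.extend([i + 1] * n)
--         i += n
--     return result
-- ===== Notes on version B (the rewrite author's own statement) =====
-- stated objective: alternative
-- what changed: Iterates over maximal runs of equal totals with itertools.groupby and fills each run with its start place, instead of a per-element branch comparing each element with its predecessor and carrying a latest_place variable.
import Mathlib
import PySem

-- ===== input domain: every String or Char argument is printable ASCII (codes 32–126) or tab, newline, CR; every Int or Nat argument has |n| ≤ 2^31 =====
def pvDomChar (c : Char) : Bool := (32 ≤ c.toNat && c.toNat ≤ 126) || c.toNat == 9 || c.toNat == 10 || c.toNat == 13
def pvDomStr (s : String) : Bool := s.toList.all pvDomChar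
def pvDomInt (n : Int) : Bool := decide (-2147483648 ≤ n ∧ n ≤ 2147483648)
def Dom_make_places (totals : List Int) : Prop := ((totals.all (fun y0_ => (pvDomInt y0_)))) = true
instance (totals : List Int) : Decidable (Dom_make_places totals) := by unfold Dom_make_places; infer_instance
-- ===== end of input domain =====

-- B iterates over maximal runs of equal totals and fills each run with its start place;
-- A branches per element against its predecessor. Same values, different decomposition.

-- ===== PORT A =====
-- for idx, total_score in enumerate(totals): modeled as a foldl over totals carrying
-- (result, latest_place, idx) as state; result[idx] = latest_place appends (idx grows by 1
-- each iteration and result's written prefix has length idx).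
def make_places (totals : List Int) : List Int :=
  (totals.foldl
    (fun (st : List Int × Int × Int) t =>
      let idx := st.2.2
      let latest := if idx = 0 ∨ some t ≠ PySem.List.pyGet? totals (idx - 1) then idx + 1 else st.2.1
      (st.1 ++ [latest], latest, idx + 1))
    ([], 0, 0)).1

-- ===== PORT B =====
-- groupby(totals): each step consumes the maximal run of elements equal to the head.
def altGo (i : Int) : List Int → List Int
  | [] => []
  | x :: xs =>
      let n : Nat := 1 + (xs.takeWhile (· == x)).length
      List.replicate n (i + 1) ++ altGo (i + n) (xs.dropWhile (· == x))
  termination_by xs => xs.length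
  decreasing_by simpa using Nat.lt_succ_of_le (List.length_dropWhile_le _ _)

def make_places_alt (totals : List Int) : List Int := altGo 0 totals

-- ===== PRECONDITION & SPEC =====
def Spec_make_places (totals : List Int) (out : List Int) : Prop := out = make_places_alt totals
instance (totals : List Int) (out : List Int) : Decidable (Spec_make_places totals out) := by unfold Spec_make_places; infer_instance

-- ===== CLAIM (what is proved, stated in full; the proofs are below) =====
def Claim_equal_make_places : Prop := ∀ (totals : List Int), Dom_make_places totals → Spec_make_places totals (make_places totals)

-- ===== LEMMAS AND PROOFS =====

-- per-element recursion equivalent to A's fold: carries index, latest place, previous element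
def goA (idx latest : Int) (prev : Option Int) : List Int → List Int
  | [] => []
  | t :: rest =>
      let lp := if idx = 0 ∨ some t ≠ prev then idx + 1 else latest
      lp :: goA (idx + 1) lp (some t) rest

lemma pyGet_pred (pre xs : List Int) (h : pre ≠ []) :
    PySem.List.pyGet? (pre ++ xs) ((pre.length : Int) - 1) = pre.getLast? := by
  have hl : 1 ≤ pre.length := List.length_pos_iff.mpr h
  have : ((pre.length : Int) - 1) = ((pre.length - 1 : Nat) : Int) := by omega
  rw [this, PySem.List.pyGet?_natCast, List.getElem?_append_left (by omega),
    List.getLast?_eq_getElem?]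

lemma foldA_goA (totals : List Int) :
    ∀ (xs pre res : List Int) (lat : Int), pre ++ xs = totals →
    (xs.foldl
      (fun (st : List Int × Int × Int) t =>
        let idx := st.2.2
        let latest := if idx = 0 ∨ some t ≠ PySem.List.pyGet? totals (idx - 1) then idx + 1 else st.2.1
        (st.1 ++ [latest], latest, idx + 1))
      (res, lat, (pre.length : Int))).1
    = res ++ goA (pre.length) lat pre.getLast? xs := by
  intro xs
  induction xs with
  | nil => intro pre res lat _; simp [goA]
  | cons t rest ih =>
    intro pre res lat htot
    have hcond : ((pre.length : Int) = 0 ∨ some t ≠ PySem.List.pyGet? totals ((pre.length : Int) - 1))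
        ↔ ((pre.length : Int) = 0 ∨ some t ≠ pre.getLast?) := by
      rcases eq_or_ne pre [] with h | h
      · subst h; simp
      · rw [← htot, pyGet_pred pre (t :: rest) h]
    simp only [List.foldl_cons, goA]
    rw [if_congr hcond rfl rfl]
    set lp := if (pre.length : Int) = 0 ∨ some t ≠ pre.getLast? then (pre.length : Int) + 1 else lat with hlp
    have hpre : (pre ++ [t]) ++ rest = totals := by simpa using htot
    have := ih (pre ++ [t]) (res ++ [lp]) lp hpre
    simp only [List.length_append, List.length_cons, List.length_nil, Nat.cast_add,
      Nat.cast_one, List.getLast?_concat] at this ⊢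
    norm_num at this
    rw [this]

-- within a run of elements equal to x, every place stays lat
lemma goA_run : ∀ (rest : List Int) (x lat : Int) (j : Int), 0 < j →
    goA j lat (some x) rest
      = List.replicate (rest.takeWhile (· == x)).length lat
        ++ goA (j + (rest.takeWhile (· == x)).length) lat (some x) (rest.dropWhile (· == x)) := by
  intro rest
  induction rest with
  | nil => intro x lat j hj; simp [goA]
  | cons y ys ih =>
    intro x lat j hj
    by_cases hyx : y = x
    · subst hyx
      have h1 : ¬ (j = 0 ∨ some y ≠ some y) := by simp; omega
      simp only [goA, if_neg h1]
      rw [ih y lat (j + 1) (by omega)]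
      simp only [List.takeWhile_cons, BEq.rfl, List.dropWhile_cons]
      simp [List.replicate_succ]
      congr 1
      omega
    · have hb : (y == x) = false := by simp [hyx]
      simp [hb]

lemma dropWhile_head_ne (x : Int) : ∀ (xs : List Int) (y : Int),
    (xs.dropWhile (· == x)).head? = some y → y ≠ x := by
  intro xs
  induction xs with
  | nil => intro y h; simp [List.dropWhile] at h
  | cons z zs ih =>
    intro y h
    by_cases hzx : z = x
    · subst hzx; simp only [List.dropWhile_cons, BEq.rfl] at h; exact ih y h
    · have hb : (z == x) = false := by simp [hzx]
      simp only [List.dropWhile_cons, hb] at h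
      simp at h
      rw [← h]; exact hzx

lemma goA_altGo : ∀ (n : Nat) (xs : List Int) (i lat : Int) (prev : Option Int),
    xs.length ≤ n → 0 ≤ i →
    (∀ y p, xs.head? = some y → prev = some p → y ≠ p) →
    goA i lat prev xs = altGo i xs := by
  intro n
  induction n with
  | zero =>
    intro xs i lat prev hn _ _
    have : xs = [] := List.eq_nil_of_length_eq_zero (Nat.le_zero.mp hn)
    subst this; simp [goA, altGo]
  | succ m ih =>
    intro xs i lat prev hn hi hhead
    cases xs with
    | nil => simp [goA, altGo]
    | cons x rest =>
      have hcond : (i = 0 ∨ some x ≠ prev) := by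
        cases prev with
        | none => right; simp
        | some p => right; simpa using hhead x p rfl rfl
      simp only [goA, if_pos hcond]
      rw [goA_run rest x (i + 1) (i + 1) (by omega)]
      set k := (rest.takeWhile (· == x)).length with hk
      set rest' := rest.dropWhile (· == x) with hr
      have hlen : rest'.length ≤ m := by
        have h1 : rest'.length ≤ rest.length := List.length_dropWhile_le _ _
        have h2 : rest.length + 1 ≤ m + 1 := by simpa using hn
        omega
      have htail : goA (i + 1 + (k : Int)) (i + 1) (some x) rest' = altGo (i + 1 + (k : Int)) rest' := by
        apply ih rest' _ _ _ hlen (by omega)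
        intro y p hy hp
        have := dropWhile_head_ne x rest y hy
        simp only [Option.some.injEq] at hp
        rw [← hp]; exact this
      rw [htail]
      show (i + 1) :: (List.replicate k (i + 1) ++ altGo (i + 1 + (k : Int)) rest') = altGo i (x :: rest)
      rw [altGo]
      have hn1 : (1 + k : Nat) = k + 1 := by omega
      rw [← hk, ← hr, hn1, List.replicate_succ]
      simp only [List.cons_append]
      have harg : i + 1 + (k : Int) = i + ((k + 1 : Nat) : Int) := by push_cast; ring
      rw [harg]

-- ===== VERDICT (by name: the statement is the Claim_ definition above) =====
theorem make_places_spec : Claim_equal_make_places := by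
  intro totals _
  show make_places totals = make_places_alt totals
  unfold make_places make_places_alt
  have h := foldA_goA totals totals [] [] 0 (by simp)
  simp only [List.length_nil, Nat.cast_zero, List.getLast?_nil, List.nil_append] at h
  rw [h]
  exact goA_altGo totals.length totals 0 0 none le_rfl le_rfl (by intro y p _ hp; cases hp)
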